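-- pv_equiv track=rewrite | github.com/UCB-stat-159-f25/final-group09 | src/analysis_utils.py | parse_demographic_label
-- ===== SOURCE A (Python) =====
-- def parse_demographic_label(stub_label):
--     """
--     Parse STUB_LABEL into separate demographic components.
--
--     Parameters
--     ----------
--     stub_label : str
--         Combined demographic string, e.g., "Male: 25-34 years"
--
--     Returns
--     -------
--     dict
--         Dictionary with keys sex, age_group, race_ethnicity
--     """
--     result = {"sex": None, "age_group": None, "race_ethnicity": None}
--
--     if stub_label == "All persons":
--         result["sex"] = "All"
--         return result
--
--     parts = stub_label.split(": ")
--
--     if parts[0] in ["Male", "Female"]: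
--         result["sex"] = parts[0]
--         parts = parts[1:]
--
--     for part in parts:
--         if "years" in part:
--             result["age_group"] = part
--         else:
--             if result["race_ethnicity"] is None:
--                 result["race_ethnicity"] = part
--             else:
--                 result["race_ethnicity"] += ": " + part
--
--     return result
-- ===== SOURCE B (Python) =====
-- def _scan(parts):
--     """Recursively combine the head part with the (age, race) of the tail suffix."""
--     if not parts:
--         return None, None
--     age, race = _scan(parts[1:])
--     head = parts[0]
--     if "years" in head:
--         return (age if age is not None else head), race
--     return age, (head if race is None else head + ": " + race)
--
--
-- def parse_demographic_label(stub_label):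
--     if stub_label == "All persons":
--         return {"sex": "All", "age_group": None, "race_ethnicity": None}
--     parts = stub_label.split(": ")
--     sex = None
--     if parts[0] in ("Male", "Female"):
--         sex, parts = parts[0], parts[1:]
--     age, race = _scan(parts)
--     return {"sex": sex, "age_group": age, "race_ethnicity": race}
-- ===== Notes on version B (the rewrite author's own statement) =====
-- stated objective: alternative
-- what changed: Replaces A's forward stateful loop that mutates a dict (last-wins overwrite for age_group, None/append accumulation for race_ethnicity) by a structural recursion on the suffix of the parts list: each step combines the head part with the (age, race) pair recursively computed for the tail, keeping the tail's age if present and prepending the head to the tail's race string.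
import Mathlib
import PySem

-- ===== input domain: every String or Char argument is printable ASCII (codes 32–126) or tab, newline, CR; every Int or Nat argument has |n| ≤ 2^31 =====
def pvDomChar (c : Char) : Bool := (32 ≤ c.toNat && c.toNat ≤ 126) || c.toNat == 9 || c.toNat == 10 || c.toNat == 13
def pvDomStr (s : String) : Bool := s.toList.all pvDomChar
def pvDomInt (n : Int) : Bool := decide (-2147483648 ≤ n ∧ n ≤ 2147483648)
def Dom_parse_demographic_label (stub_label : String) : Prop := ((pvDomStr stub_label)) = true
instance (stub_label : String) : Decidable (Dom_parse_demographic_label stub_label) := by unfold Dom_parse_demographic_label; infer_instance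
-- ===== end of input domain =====

-- B replaces A's forward stateful dict-mutating loop by a structural recursion on the suffix
-- of the parts list (head combined with the tail's (age, race) pair); objective: alternative.


-- ===== PORT A =====
-- the body of A's for-loop: update the result dict with one part
def pvLoopStep (r : PySem.Dict String (Option String)) (part : String) :
    PySem.Dict String (Option String) :=
  if PySem.Str.isIn "years" part then
    r.insert "age_group" (some part)
  else
    match r.getD "race_ethnicity" none with
    | none => r.insert "race_ethnicity" (some part)
    | some prev => r.insert "race_ethnicity" (some (PySem.Str.join "" [prev, ": ", part]))

def parse_demographic_label (stub_label : String) : List (String × Option String) :=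
  let result : PySem.Dict String (Option String) :=
    PySem.Dict.ofList [("sex", none), ("age_group", none), ("race_ethnicity", none)]
  if stub_label == "All persons" then
    ((result.insert "sex" (some "All"))).items
  else
    let parts := (PySem.Str.split? stub_label ": ").getD []
    let sp : PySem.Dict String (Option String) × List String :=
      match PySem.List.pyGet? parts 0 with
      | some p0 =>
          if p0 == "Male" || p0 == "Female" then
            (result.insert "sex" (some p0), PySem.List.slice parts (some 1) none)
          else (result, parts)
      | none => (result, parts)
    (sp.2.foldl pvLoopStep sp.1).items

-- ===== PORT B =====
-- B's recursive helper _scan: combine the head part with the (age, race) of the tail suffix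
def pvScan : List String → Option String × Option String
  | [] => (none, none)
  | head :: rest =>
      let ar := pvScan rest
      if PySem.Str.isIn "years" head then
        ((match ar.1 with | some a => some a | none => some head), ar.2)
      else
        (ar.1, (match ar.2 with
                | none => some head
                | some r => some (PySem.Str.join "" [head, ": ", r])))

def parse_demographic_label_alt (stub_label : String) : List (String × Option String) :=
  if stub_label == "All persons" then
    [("sex", some "All"), ("age_group", none), ("race_ethnicity", none)]
  else
    let parts := (PySem.Str.split? stub_label ": ").getD []
    let sp : Option String × List String :=
      match PySem.List.pyGet? parts 0 with
      | some p0 =>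
          if p0 == "Male" || p0 == "Female" then
            (some p0, PySem.List.slice parts (some 1) none)
          else (none, parts)
      | none => (none, parts)
    let ar := pvScan sp.2
    [("sex", sp.1), ("age_group", ar.1), ("race_ethnicity", ar.2)]

-- ===== PRECONDITION & SPEC =====
def Spec_parse_demographic_label (stub_label : String) (out : List (String × Option String)) : Prop := out = parse_demographic_label_alt stub_label
instance (stub_label : String) (out : List (String × Option String)) : Decidable (Spec_parse_demographic_label stub_label out) := by unfold Spec_parse_demographic_label; infer_instance

-- ===== CLAIM (what is proved, stated in full; the proofs are below) =====
def Claim_equal_parse_demographic_label : Prop := ∀ (stub_label : String), Dom_parse_demographic_label stub_label → Spec_parse_demographic_label stub_label (parse_demographic_label stub_label)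

-- ===== LEMMAS AND PROOFS =====

-- the loop preserves the literal three-key dict shape; its effect factors through the two fields
def pvMk3 (s a r : Option String) : PySem.Dict String (Option String) :=
  PySem.Dict.mk [("sex", s), ("age_group", a), ("race_ethnicity", r)]

theorem pvLoopStep_mk3 (s a r : Option String) (p : String) :
    pvLoopStep (pvMk3 s a r) p =
      if PySem.Str.isIn "years" p then pvMk3 s (some p) r
      else match r with
        | none => pvMk3 s a (some p)
        | some prev => pvMk3 s a (some (PySem.Str.join "" [prev, ": ", p])) := by
  simp only [pvLoopStep, pvMk3]
  split
  · rfl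
  · cases r <;> rfl

-- A's loop over an arbitrary start state, phrased on the two mutable fields
theorem pvLoop_mk3 (parts : List String) (s a r : Option String) :
    parts.foldl pvLoopStep (pvMk3 s a r) =
      pvMk3 s
        ((parts.filter (fun p => PySem.Str.isIn "years" p)).foldl (fun _ p => some p) a)
        ((parts.filter (fun p => !PySem.Str.isIn "years" p)).foldl
          (fun acc p => match acc with
            | none => some p
            | some prev => some (PySem.Str.join "" [prev, ": ", p])) r) := by
  induction parts generalizing a r with
  | nil => rfl
  | cons p rest ih =>
      simp only [List.foldl_cons, pvLoopStep_mk3, List.filter_cons]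
      by_cases h : PySem.Str.isIn "years" p = true
      · simp only [h, if_true, Bool.not_true, Bool.false_eq_true, if_false, List.foldl_cons, ih]
      · simp only [Bool.not_eq_true] at h
        simp only [h, Bool.false_eq_true, if_false, Bool.not_false, if_true, List.foldl_cons]
        cases r <;> simp only [ih]

theorem pvLast_foldl (xs : List String) (a : Option String) :
    xs.foldl (fun _ p => some p) a = match xs.getLast? with | some x => some x | none => a := by
  induction xs generalizing a with
  | nil => rfl
  | cons p rest ih =>
      simp only [List.foldl_cons, ih]
      cases hr : rest.getLast? with
      | none =>
          have hnil : rest = [] := List.getLast?_eq_none_iff.mp hr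
          subst hnil; rfl
      | some x =>
          obtain ⟨q, t, rfl⟩ : ∃ q t, rest = q :: t := by
            cases rest with
            | nil => simp at hr
            | cons q t => exact ⟨q, t, rfl⟩
          simp [List.getLast?_cons_cons, hr]

theorem pvJoin_pair (x p : String) :
    PySem.Str.join "" [x, ": ", p] = PySem.Str.join ": " [x, p] := by
  apply String.toList_injective
  simp [PySem.Str.toList_join, PySem.Chars.join_cons_cons, PySem.Chars.join_singleton]

theorem pvJoin_prepend (p x : String) (l : List String) :
    PySem.Str.join "" [p, ": ", PySem.Str.join ": " (x :: l)] =
      PySem.Str.join ": " (p :: x :: l) := by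
  apply String.toList_injective
  simp [PySem.Str.toList_join, PySem.Chars.join_cons_cons, PySem.Chars.join_singleton]

-- A's race accumulator, characterised as the ': '-join of the filtered parts
theorem pvRace_foldl_some (xs : List String) (x : String) :
    xs.foldl
        (fun acc p => match acc with
          | none => some p
          | some prev => some (PySem.Str.join "" [prev, ": ", p])) (some x)
      = some (PySem.Str.join ": " (x :: xs)) := by
  induction xs generalizing x with
  | nil =>
      show some x = some (PySem.Str.join ": " [x])
      have hx : PySem.Str.join ": " [x] = x := by
        apply String.toList_injective
        simp [PySem.Str.toList_join, PySem.Chars.join_singleton]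
      rw [hx]
  | cons p rest ih =>
      show rest.foldl _ (some (PySem.Str.join "" [x, ": ", p])) = _
      rw [ih, pvJoin_pair]
      congr 1
      apply String.toList_injective
      cases rest <;>
        simp [PySem.Str.toList_join, PySem.Chars.join_cons_cons, PySem.Chars.join_singleton]

theorem pvRace_foldl_none (xs : List String) :
    xs.foldl
        (fun acc p => match acc with
          | none => some p
          | some prev => some (PySem.Str.join "" [prev, ": ", p])) none
      = match xs with | [] => none | x :: l => some (PySem.Str.join ": " (x :: l)) := by
  cases xs with
  | nil => rfl
  | cons p rest =>
      show rest.foldl _ (some p) = _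
      rw [pvRace_foldl_some]

-- B's recursion, characterised on the same filtered parts
theorem pvScan_cons_pos (p : String) (rest : List String)
    (h : PySem.Str.isIn "years" p = true) :
    pvScan (p :: rest) =
      ((match (pvScan rest).1 with | some a => some a | none => some p), (pvScan rest).2) := by
  simp only [pvScan, h, if_true]

theorem pvScan_cons_neg (p : String) (rest : List String)
    (h : PySem.Str.isIn "years" p = false) :
    pvScan (p :: rest) =
      ((pvScan rest).1,
       (match (pvScan rest).2 with
        | none => some p
        | some r => some (PySem.Str.join "" [p, ": ", r]))) := by
  simp only [pvScan, h, Bool.false_eq_true, if_false]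

theorem pvScan_fst (ps : List String) :
    (pvScan ps).1 = (ps.filter (fun p => PySem.Str.isIn "years" p)).getLast? := by
  induction ps with
  | nil => rfl
  | cons p rest ih =>
      by_cases h : PySem.Str.isIn "years" p = true
      · rw [pvScan_cons_pos p rest h]
        simp only [List.filter_cons, h, if_true]
        rw [ih]
        cases hr : (rest.filter (fun p => PySem.Str.isIn "years" p)).getLast? with
        | none =>
            have hnil : rest.filter (fun p => PySem.Str.isIn "years" p) = [] :=
              List.getLast?_eq_none_iff.mp hr
            rw [hnil]
            rfl
        | some x =>
            obtain ⟨q, t, hreact⟩ :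
                ∃ q t, rest.filter (fun p => PySem.Str.isIn "years" p) = q :: t := by
              cases hc : rest.filter (fun p => PySem.Str.isIn "years" p) with
              | nil => rw [hc] at hr; simp at hr
              | cons q t => exact ⟨q, t, rfl⟩
            rw [hreact] at hr ⊢
            rw [List.getLast?_cons_cons, hr]
      · simp only [Bool.not_eq_true] at h
        rw [pvScan_cons_neg p rest h]
        simp only [List.filter_cons, h, Bool.false_eq_true, if_false]
        exact ih

theorem pvScan_snd (ps : List String) :
    (pvScan ps).2 =
      match ps.filter (fun p => !PySem.Str.isIn "years" p) with
      | [] => none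
      | x :: l => some (PySem.Str.join ": " (x :: l)) := by
  induction ps with
  | nil => rfl
  | cons p rest ih =>
      by_cases h : PySem.Str.isIn "years" p = true
      · rw [pvScan_cons_pos p rest h]
        simp only [List.filter_cons, h, Bool.not_true, Bool.false_eq_true, if_false]
        exact ih
      · simp only [Bool.not_eq_true] at h
        rw [pvScan_cons_neg p rest h]
        simp only [List.filter_cons, h, Bool.not_false, if_true]
        rw [ih]
        cases hc : rest.filter (fun p => !PySem.Str.isIn "years" p) with
        | nil =>
            have : PySem.Str.join ": " [p] = p := by
              apply String.toList_injective
              simp [PySem.Str.toList_join, PySem.Chars.join_singleton]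
            simp only [this]
        | cons x l =>
            simp only [pvJoin_prepend]

-- ===== VERDICT (by name: the statement is the Claim_ definition above) =====
theorem parse_demographic_label_spec : Claim_equal_parse_demographic_label := by
  intro stub_label _
  unfold Spec_parse_demographic_label parse_demographic_label parse_demographic_label_alt
  have key : ∀ (s : Option String) (ps : List String),
      (ps.foldl pvLoopStep (pvMk3 s none none)).items =
        [("sex", s), ("age_group", (pvScan ps).1), ("race_ethnicity", (pvScan ps).2)] := by
    intro s ps
    rw [pvLoop_mk3, pvLast_foldl, pvRace_foldl_none, pvScan_fst, pvScan_snd]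
    cases (ps.filter (fun p => PySem.Str.isIn "years" p)).getLast? <;>
      cases ps.filter (fun p => !PySem.Str.isIn "years" p) <;> rfl
  by_cases hall : (stub_label == "All persons") = true
  · simp only [hall, if_true]
    rfl
  · simp only [hall, Bool.false_eq_true, if_false]
    cases h0 : PySem.List.pyGet? ((PySem.Str.split? stub_label ": ").getD []) 0 with
    | none => simpa using key none ((PySem.Str.split? stub_label ": ").getD [])
    | some p0 =>
        by_cases hmf : (p0 == "Male" || p0 == "Female") = true
        · simp only [hmf, if_true]
          have hins : (PySem.Dict.ofList
              [("sex", (none : Option String)), ("age_group", none), ("race_ethnicity", none)]).insert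
                "sex" (some p0) = pvMk3 (some p0) none none := by rfl
          simpa [hins] using
            key (some p0) (PySem.List.slice ((PySem.Str.split? stub_label ": ").getD []) (some 1) none)
        · simp only [hmf, Bool.false_eq_true, if_false]
          simpa using key none ((PySem.Str.split? stub_label ": ").getD [])
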